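-- pv_equiv track=rewrite | github.com/Taschee/schafkopf | schafkopf/game.py | determine_possible_partnermodes
-- ===== SOURCE A (Python) =====
-- SIEBEN = 0
--
-- ACHT = 1
--
-- NEUN = 2
--
-- KOENIG = 5
--
-- ZEHN = 6
--
-- AS = 7
--
-- SCHELLEN = 0
--
-- GRAS = 2
--
-- EICHEL = 3
--
-- def determine_possible_partnermodes(hand):
--     possible_modes = set()
--     for suit in [SCHELLEN, GRAS, EICHEL]:
--         if (AS, suit) not in hand:
--             for i in [SIEBEN, ACHT, NEUN, KOENIG, ZEHN]:
--                 if (i, suit) in hand: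
--                     possible_modes.add((1, suit))
--                     break
--     return possible_modes
-- ===== SOURCE B (Python) =====
-- SIEBEN = 0
-- ACHT = 1
-- NEUN = 2
-- KOENIG = 5
-- ZEHN = 6
-- AS = 7
-- SCHELLEN = 0
-- GRAS = 2
-- EICHEL = 3
--
-- def determine_possible_partnermodes(hand):
--     has_ace = set()
--     has_other = set()
--     for rank, suit in hand:
--         if rank == AS:
--             has_ace.add(suit)
--         elif rank in (SIEBEN, ACHT, NEUN, KOENIG, ZEHN):
--             has_other.add(suit)
--     return {(1, suit) for suit in (SCHELLEN, GRAS, EICHEL)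
--             if suit in has_other and suit not in has_ace}
-- ===== Notes on version B (the rewrite author's own statement) =====
-- stated objective: idiomatic
-- what changed: B replaces A's fixed membership probes (up to 6 list scans per suit, with a break) by one pass over the hand that indexes suits into two sets (has_ace / has_other) followed by a set comprehension over the three suits.
import Mathlib
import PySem

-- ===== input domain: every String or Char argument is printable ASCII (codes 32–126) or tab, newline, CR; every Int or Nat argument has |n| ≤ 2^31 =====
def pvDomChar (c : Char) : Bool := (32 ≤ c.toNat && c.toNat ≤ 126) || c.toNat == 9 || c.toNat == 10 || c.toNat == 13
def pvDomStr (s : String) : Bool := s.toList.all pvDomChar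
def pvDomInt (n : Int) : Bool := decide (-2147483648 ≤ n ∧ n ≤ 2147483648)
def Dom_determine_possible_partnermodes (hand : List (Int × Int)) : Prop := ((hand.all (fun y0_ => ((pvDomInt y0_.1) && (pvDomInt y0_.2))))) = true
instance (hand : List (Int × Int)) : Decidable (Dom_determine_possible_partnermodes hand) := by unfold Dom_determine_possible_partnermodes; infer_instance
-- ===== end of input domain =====

-- B re-implements A's per-suit membership probes as one pass over the hand building
-- two suit sets (has_ace / has_other) plus a comprehension over the three suits (idiomatic).

-- ===== PORT A =====
-- inner 'for i in [SIEBEN, ACHT, NEUN, KOENIG, ZEHN]: if (i, suit) in hand: add; break'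
def pvAInner (hand : List (Int × Int)) (suit : Int) (acc : PySem.Set (Int × Int)) :
    List Int → PySem.Set (Int × Int)
  | [] => acc
  | i :: rest =>
    if hand.contains (i, suit) then PySem.Set.add acc (1, suit)
    else pvAInner hand suit acc rest

def determine_possible_partnermodes (hand : List (Int × Int)) : List (Int × Int) :=
  ([(0 : Int), 2, 3]).foldl
    (fun possible_modes suit =>
      if ¬ hand.contains ((7 : Int), suit) then
        pvAInner hand suit possible_modes [0, 1, 2, 5, 6]
      else possible_modes)
    PySem.Set.empty

-- ===== PORT B =====
-- single pass: for (rank, suit) in hand: if rank == AS: has_ace.add(suit) elif rank in (…): has_other.add(suit)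
def pvBScan (hand : List (Int × Int)) : PySem.Set Int × PySem.Set Int :=
  hand.foldl
    (fun st c =>
      if c.1 == 7 then (PySem.Set.add st.1 c.2, st.2)
      else if ([(0 : Int), 1, 2, 5, 6]).contains c.1 then (st.1, PySem.Set.add st.2 c.2)
      else st)
    (PySem.Set.empty, PySem.Set.empty)

def determine_possible_partnermodes_alt (hand : List (Int × Int)) : List (Int × Int) :=
  let st := pvBScan hand
  ([(0 : Int), 2, 3]).foldl
    (fun out suit =>
      if st.2.contains suit && !(st.1.contains suit) then PySem.Set.add out (1, suit)
      else out)
    PySem.Set.empty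

-- ===== PRECONDITION & SPEC =====
def Spec_determine_possible_partnermodes (hand : List (Int × Int)) (out : List (Int × Int)) : Prop := out = determine_possible_partnermodes_alt hand
instance (hand : List (Int × Int)) (out : List (Int × Int)) : Decidable (Spec_determine_possible_partnermodes hand out) := by unfold Spec_determine_possible_partnermodes; infer_instance

-- ===== CLAIM (what is proved, stated in full; the proofs are below) =====
def Claim_equal_determine_possible_partnermodes : Prop := ∀ (hand : List (Int × Int)), Dom_determine_possible_partnermodes hand → Spec_determine_possible_partnermodes hand (determine_possible_partnermodes hand)

-- ===== LEMMAS AND PROOFS =====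

-- membership after Python set.add, Bool form
theorem pv_contains_add (s : PySem.Set Int) (x y : Int) :
    (PySem.Set.add s x).contains y = (s.contains y || (x == y)) := by
  simp [PySem.Set.contains, PySem.Set.mem_add, Bool.beq_eq_decide_eq, eq_comm]

-- A's inner loop adds (1, suit) iff some probed rank is in the hand
theorem pvAInner_eq (hand : List (Int × Int)) (suit : Int) (acc : PySem.Set (Int × Int))
    (ranks : List Int) :
    pvAInner hand suit acc ranks =
      if ranks.any (fun i => hand.contains (i, suit)) then PySem.Set.add acc (1, suit) else acc := by
  induction ranks with
  | nil => simp [pvAInner]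
  | cons i rest ih =>
    simp only [pvAInner, List.any_cons]
    by_cases h : hand.contains (i, suit) = true
    · have h' : (i, suit) ∈ hand := by simpa using h
      rw [if_pos h]; simp [h']
    · have h' : (i, suit) ∉ hand := by simpa using h
      rw [if_neg h, ih]; simp [h']

-- membership in the ace set built by B's scan, for arbitrary initial state
theorem pvBScan_fst_contains (hand : List (Int × Int)) (a o : PySem.Set Int) (s : Int) :
    (hand.foldl
      (fun st c =>
        if c.1 == 7 then (PySem.Set.add st.1 c.2, st.2)
        else if ([(0 : Int), 1, 2, 5, 6]).contains c.1 then (st.1, PySem.Set.add st.2 c.2)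
        else st)
      (a, o)).1.contains s =
    (a.contains s || hand.any (fun c => c.1 == 7 && c.2 == s)) := by
  induction hand generalizing a o with
  | nil => simp
  | cons c rest ih =>
    simp only [List.foldl_cons, List.any_cons]
    by_cases h7 : (c.1 == 7) = true
    · rw [if_pos h7, ih, pv_contains_add]
      simp [h7, Bool.or_assoc]
    · rw [if_neg h7]
      simp only [Bool.not_eq_true] at h7
      by_cases hr : ([(0 : Int), 1, 2, 5, 6]).contains c.1 = true
      · rw [if_pos hr, ih]; simp [h7]
      · rw [if_neg hr, ih]; simp [h7]

-- membership in the other-ranks set built by B's scan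
theorem pvBScan_snd_contains (hand : List (Int × Int)) (a o : PySem.Set Int) (s : Int) :
    (hand.foldl
      (fun st c =>
        if c.1 == 7 then (PySem.Set.add st.1 c.2, st.2)
        else if ([(0 : Int), 1, 2, 5, 6]).contains c.1 then (st.1, PySem.Set.add st.2 c.2)
        else st)
      (a, o)).2.contains s =
    (o.contains s || hand.any (fun c => ([(0 : Int), 1, 2, 5, 6]).contains c.1 && c.2 == s)) := by
  induction hand generalizing a o with
  | nil => simp
  | cons c rest ih =>
    simp only [List.foldl_cons, List.any_cons]
    by_cases h7 : (c.1 == 7) = true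
    · rw [if_pos h7, ih]
      have hr : ([(0 : Int), 1, 2, 5, 6]).contains c.1 = false := by
        simp only [beq_iff_eq] at h7; simp [h7]
      rw [hr, Bool.false_and, Bool.false_or]
    · rw [if_neg h7]
      cases hr : ([(0 : Int), 1, 2, 5, 6]).contains c.1
      · rw [if_neg (by simp), ih]
        simp only [Bool.false_and, Bool.false_or]
      · rw [if_pos rfl, ih, pv_contains_add]
        simp only [Bool.true_and, Bool.or_assoc]

-- A's probe for the ace equals B's any-scan of the hand
theorem pv_contains_ace (hand : List (Int × Int)) (s : Int) :
    hand.contains ((7 : Int), s) = hand.any (fun c => c.1 == 7 && c.2 == s) := by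
  rw [Bool.eq_iff_iff]
  simp only [List.contains_eq_mem, List.any_eq_true, Bool.and_eq_true, beq_iff_eq,
    decide_eq_true_eq]
  constructor
  · intro h; exact ⟨(7, s), h, rfl, rfl⟩
  · rintro ⟨c, hc, h1, h2⟩
    rwa [show ((7 : Int), s) = c from Prod.ext_iff.mpr ⟨h1.symm, h2.symm⟩]

-- A's per-rank probes equal B's any-scan with the rank filter
theorem pv_any_ranks (hand : List (Int × Int)) (s : Int) :
    (([(0 : Int), 1, 2, 5, 6]).any (fun i => hand.contains (i, s))) =
      hand.any (fun c => ([(0 : Int), 1, 2, 5, 6]).contains c.1 && c.2 == s) := by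
  rw [Bool.eq_iff_iff]
  simp only [List.any_eq_true, List.contains_eq_mem, decide_eq_true_eq, Bool.and_eq_true,
    beq_iff_eq]
  constructor
  · rintro ⟨i, hi, hmem⟩
    exact ⟨(i, s), hmem, hi, rfl⟩
  · rintro ⟨c, hc, hr, hs⟩
    exact ⟨c.1, hr, by rwa [show (c.1, s) = c from Prod.ext_iff.mpr ⟨rfl, hs.symm⟩]⟩

-- A's per-suit branch shape equals B's conjunction shape
theorem pv_branch (c7 q : Bool) (acc : PySem.Set (Int × Int)) (x : Int × Int) :
    (if ¬ c7 = true then (if q = true then PySem.Set.add acc x else acc) else acc) =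
      (if (q && !c7) = true then PySem.Set.add acc x else acc) := by
  cases c7 <;> cases q <;> simp

-- ===== VERDICT (by name: the statement is the Claim_ definition above) =====
theorem determine_possible_partnermodes_spec : Claim_equal_determine_possible_partnermodes := by
  intro hand _
  unfold Spec_determine_possible_partnermodes determine_possible_partnermodes
    determine_possible_partnermodes_alt pvBScan
  simp only [List.foldl_cons, List.foldl_nil, pvAInner_eq, pv_contains_ace, pv_any_ranks,
    pv_branch, PySem.Set.empty]
  simp only [pvBScan_fst_contains, pvBScan_snd_contains]
  simp only [PySem.Set.contains, List.contains_nil, Bool.false_or]
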